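-- pv_equiv track=rewrite | github.com/Franchi23/Informatorio2025 | Etapa2/EjercicioFunciones1.py | misterio
-- ===== SOURCE A (Python) =====
-- def misterio(palabra):
--     invertida=""
--     if (len(palabra) > 5):
--         for caracter in palabra:
--             invertida = caracter + invertida
--         return invertida
--     else:
--         return palabra.upper()
-- ===== SOURCE B (Python) =====
-- def misterio(palabra):
--     if len(palabra) <= 5:
--         return palabra.upper()
--     n = len(palabra)
--     return "".join(palabra[n - 1 - i] for i in range(n))
-- ===== Notes on version B (the rewrite author's own statement) =====
-- stated objective: idiomatic
-- what changed: Replaces A's character-prepend accumulation loop with a single join over the characters read back-to-front by index (linear concatenation instead of repeated string rebuilding).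
import Mathlib
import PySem

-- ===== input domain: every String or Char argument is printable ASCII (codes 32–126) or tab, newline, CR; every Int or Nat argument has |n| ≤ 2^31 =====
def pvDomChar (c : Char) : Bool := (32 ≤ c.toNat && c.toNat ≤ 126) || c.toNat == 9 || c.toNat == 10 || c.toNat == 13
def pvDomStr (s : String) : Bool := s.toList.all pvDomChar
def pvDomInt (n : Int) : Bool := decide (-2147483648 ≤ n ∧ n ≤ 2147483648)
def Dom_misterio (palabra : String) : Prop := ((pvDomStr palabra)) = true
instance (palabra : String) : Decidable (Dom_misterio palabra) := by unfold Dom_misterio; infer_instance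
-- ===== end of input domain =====

-- B replaces A's prepend-accumulator loop by joining the characters read back-to-front by index.

-- ===== PORT A =====
-- for caracter in palabra: invertida = caracter + invertida
def misterio (palabra : String) : String :=
  if PySem.Str.len palabra > 5 then
    palabra.toList.foldl (fun invertida caracter =>
      String.ofList (caracter :: invertida.toList)) ""
  else
    PySem.Str.upper palabra

-- ===== PORT B =====
-- "".join(palabra[n - 1 - i] for i in range(n))
def misterio_alt (palabra : String) : String :=
  if PySem.Str.len palabra ≤ 5 then
    PySem.Str.upper palabra
  else
    let n : Int := PySem.Str.len palabra
    String.ofList (PySem.Chars.join []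
      ((PySem.List.pyRange 0 n 1).map
        (fun i => ((PySem.List.pyGet? palabra.toList (n - 1 - i)).map (fun c => [c])).getD [])))

-- ===== PRECONDITION & SPEC =====
def Spec_misterio (palabra : String) (out : String) : Prop := out = misterio_alt palabra
instance (palabra : String) (out : String) : Decidable (Spec_misterio palabra out) := by unfold Spec_misterio; infer_instance

-- ===== CLAIM (what is proved, stated in full; the proofs are below) =====
def Claim_equal_misterio : Prop := ∀ (palabra : String), Dom_misterio palabra → Spec_misterio palabra (misterio palabra)

-- ===== LEMMAS AND PROOFS =====
theorem misterio_foldl_rev (l : List Char) (acc : String) :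
    l.foldl (fun invertida caracter => String.ofList (caracter :: invertida.toList)) acc
      = String.ofList (l.reverse ++ acc.toList) := by
  induction l generalizing acc with
  | nil => simp [String.ofList]
  | cons c t ih => simp [List.foldl, ih]

theorem misterio_map_range_rev (l : List Char) :
    ((PySem.List.pyRange 0 (l.length : Int) 1).map
      (fun i => ((PySem.List.pyGet? l ((l.length : Int) - 1 - i)).map (fun c => [c])).getD []))
      = l.reverse.map (fun c => [c]) := by
  apply List.ext_getElem
  · simp [PySem.List.length_pyRange_one]
  · intro k h1 h2
    simp only [PySem.List.length_pyRange_one, List.length_map, List.length_reverse] at h1 h2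
    have hk : k < l.length := by omega
    rw [List.getElem_map, List.getElem_map,
        PySem.List.getElem_pyRange_one _ _ k (by simp [PySem.List.length_pyRange_one]; omega),
        PySem.List.pyGet?_eq_some_getElem l (by omega) (by omega)]
    have ht : ((l.length : Int) - 1 - (0 + (k : Int))).toNat = l.length - 1 - k := by omega
    simp only [Option.map_some, Option.getD_some, ht, List.getElem_reverse]

theorem misterio_join_rev (l : List Char) :
    PySem.Chars.join []
      ((PySem.List.pyRange 0 (l.length : Int) 1).map
        (fun i => ((PySem.List.pyGet? l ((l.length : Int) - 1 - i)).map (fun c => [c])).getD []))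
      = l.reverse := by
  rw [misterio_map_range_rev, PySem.Chars.join_nil_singletons]

-- ===== VERDICT (by name: the statement is the Claim_ definition above) =====
theorem misterio_spec : Claim_equal_misterio := by
  intro palabra _
  unfold Spec_misterio misterio misterio_alt
  rcases lt_or_ge 5 (PySem.Str.len palabra) with h | h
  · rw [if_pos h, if_neg (by omega), misterio_foldl_rev]
    have hlen : (PySem.Str.len palabra : Int) = (palabra.toList.length : Int) := by
      simp [PySem.Str.len_eq]
    simp only [hlen, misterio_join_rev]
    simp
  · rw [if_neg (by omega), if_pos (by omega)]
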